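-- pv_equiv track=rewrite | github.com/arrita-design/philly-assessment | app.py | normalize_address_for_search
-- ===== SOURCE A (Python) =====
-- def normalize_address_for_search(address: str) -> str:
--     """
--     Clean user address and turn it into a pattern we can use with ILIKE
--     against p.location in opa_properties_public_pde.
--     """
--     if not address:
--         return ""
--
--     # Only use first part if they paste "780 Union Street, Philadelphia, PA"
--     a = address.strip().split(",")[0]
--     if not a:
--         return ""
--
--     a = a.upper()
--
--     # Strip leading zeros from the house number
--     parts = a.split()
--     if parts and parts[0].isdigit():
--         try:
--             parts[0] = str(int(parts[0]))  # "0780" -> "780"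
--         except ValueError:
--             pass
--     a = " ".join(parts)
--
--     suffix_map = {
--         " STREET": " ST",
--         " AVENUE": " AVE",
--         " BOULEVARD": " BLVD",
--         " ROAD": " RD",
--         " DRIVE": " DR",
--         " PLACE": " PL",
--         " COURT": " CT",
--         " LANE": " LN",
--         " TERRACE": " TER",
--     }
--     for long_suffix, short_suffix in suffix_map.items():
--         if a.endswith(long_suffix):
--             a = a[: -len(long_suffix)] + short_suffix
--             break
--
--     a = a.replace("'", "''")
--     return f"%{a}%"   # e.g. "%780 UNION ST%"
-- ===== SOURCE B (Python) =====
-- SUFFIX_ABBREV = {"STREET": "ST", "AVENUE": "AVE", "BOULEVARD": "BLVD",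
--                  "ROAD": "RD", "DRIVE": "DR", "PLACE": "PL",
--                  "COURT": "CT", "LANE": "LN", "TERRACE": "TER"}
--
-- def normalize_address_for_search(address: str) -> str:
--     # One positional pass over the token list instead of an endswith scan
--     # over a space-prefixed suffix map.
--     words = address.strip().split(",")[0].upper().split()
--     if not words:
--         return ""
--     if words[0].isdigit():
--         words[0] = str(int(words[0]))
--     if len(words) >= 2:
--         words[-1] = SUFFIX_ABBREV.get(words[-1], words[-1])
--     return "%" + " ".join(words).replace("'", "''") + "%"
-- ===== Notes on version B (the rewrite author's own statement) =====
-- stated objective: simpler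
-- what changed: B tokenizes the comma-head once and works positionally on the word list (strip leading zeros from words[0], replace words[-1] by a direct dict lookup when there are at least two words), instead of A's separate split/join pass for the house number followed by a break-on-first-hit endswith scan over a space-prefixed suffix map on the rejoined string.
import Mathlib
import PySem

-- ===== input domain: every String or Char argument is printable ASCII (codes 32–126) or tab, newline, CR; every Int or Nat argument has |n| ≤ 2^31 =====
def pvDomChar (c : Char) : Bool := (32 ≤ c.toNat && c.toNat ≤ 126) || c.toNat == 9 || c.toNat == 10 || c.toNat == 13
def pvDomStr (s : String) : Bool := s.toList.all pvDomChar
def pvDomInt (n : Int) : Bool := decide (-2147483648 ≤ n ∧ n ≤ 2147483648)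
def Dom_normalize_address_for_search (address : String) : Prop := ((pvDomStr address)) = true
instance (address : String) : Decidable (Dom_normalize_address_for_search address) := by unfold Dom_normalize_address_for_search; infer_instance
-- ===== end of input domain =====

-- B replaces A's rejoin-then-endswith scan over a space-prefixed suffix map by one
-- positional pass over the word list (dict lookup on the last word); objective: simpler.

-- ===== PORT A =====
def pvSuffixMap : List (String × String) :=
  [(" STREET", " ST"), (" AVENUE", " AVE"), (" BOULEVARD", " BLVD"), (" ROAD", " RD"),
   (" DRIVE", " DR"), (" PLACE", " PL"), (" COURT", " CT"), (" LANE", " LN"), (" TERRACE", " TER")]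

-- for long_suffix, short_suffix in suffix_map.items(): if a.endswith(long): a = a[:-len(long)] + short; break
def pvSuffixScan (a : String) : List (String × String) → String
  | [] => a
  | (lng, sht) :: rest =>
    if PySem.Str.endswith a lng then
      PySem.Str.slice a none (some (-(PySem.Str.len lng))) ++ sht
    else pvSuffixScan a rest

def normalize_address_for_search (address : String) : String :=
  if address = "" then ""
  else
    -- address.strip().split(",")[0] ; split on a nonempty separator never yields [] nor none,
    -- so both defaults are unreachable
    let a := ((PySem.Str.split? (PySem.Str.strip address) ",").getD []).headD ""
    if a = "" then ""
    else
      let a := PySem.Str.upper a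
      let parts := PySem.Str.split₀ a
      let parts : List String :=
        match parts with
        | [] => []
        | p :: rest =>
          if PySem.Str.strIsdigit p then
            -- parts[0] = str(int(parts[0])); int() never fails on an isdigit string, 'except' keeps p
            (match PySem.Int.ofStr? p with
             | some n => PySem.Int.toStr n
             | none => p) :: rest
          else p :: rest
      let a := PySem.Str.join " " parts
      let a := pvSuffixScan a pvSuffixMap
      let a := PySem.Str.replace a "'" "''"
      "%" ++ a ++ "%"

-- ===== PORT B =====
def pvSuffixAbbrev : PySem.Dict String String :=
  ⟨[("STREET", "ST"), ("AVENUE", "AVE"), ("BOULEVARD", "BLVD"), ("ROAD", "RD"),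
    ("DRIVE", "DR"), ("PLACE", "PL"), ("COURT", "CT"), ("LANE", "LN"), ("TERRACE", "TER")]⟩

def normalize_address_for_search_alt (address : String) : String :=
  -- words = address.strip().split(",")[0].upper().split()  (split(",") defaults unreachable, as in port A)
  match PySem.Str.split₀ (PySem.Str.upper (((PySem.Str.split? (PySem.Str.strip address) ",").getD []).headD "")) with
  | [] => ""
  | w0 :: rest =>
    -- words[0] = str(int(words[0])) under the isdigit guard; 'none' unreachable (isdigit strings parse)
    let w0 := if PySem.Str.strIsdigit w0 then
        match PySem.Int.ofStr? w0 with
        | some n => PySem.Int.toStr n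
        | none => w0
      else w0
    let words := w0 :: rest
    -- words[-1] = SUFFIX_ABBREV.get(words[-1], words[-1]) when len(words) >= 2
    let last := PySem.List.pyGetD words (-1) ""   -- words ≠ [], default unreachable
    let words := if 2 ≤ words.length then words.dropLast ++ [pvSuffixAbbrev.getD last last] else words
    "%" ++ PySem.Str.replace (PySem.Str.join " " words) "'" "''" ++ "%"

-- ===== PRECONDITION & SPEC =====
def Spec_normalize_address_for_search (address : String) (out : String) : Prop := out = normalize_address_for_search_alt address
instance (address : String) (out : String) : Decidable (Spec_normalize_address_for_search address out) := by unfold Spec_normalize_address_for_search; infer_instance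

-- ===== CLAIM (what is proved, stated in full; the proofs are below) =====
def Claim_equal_normalize_address_for_search : Prop := ∀ (address : String), Dom_normalize_address_for_search address → Spec_normalize_address_for_search address (normalize_address_for_search address)

-- ===== LEMMAS AND PROOFS =====

-- splitOn.go prepends acc.reverse to whatever it returns
theorem pv_go_acc (sep : List Char) (fuel : Nat) (l cur : List Char) (acc : List (List Char)) :
    ∃ t, PySem.Chars.splitOn.go sep fuel l cur acc = acc.reverse ++ t := by
  induction fuel generalizing l cur acc with
  | zero => exact ⟨[cur.reverse ++ l], by simp [PySem.Chars.splitOn.go]⟩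
  | succ fuel ih =>
    cases l with
    | nil => exact ⟨[cur.reverse], by simp [PySem.Chars.splitOn.go]⟩
    | cons c rest =>
      by_cases hp : sep.isPrefixOf (c :: rest) = true
      · obtain ⟨t, ht⟩ := ih (List.drop sep.length (c :: rest)) [] (cur.reverse :: acc)
        exact ⟨cur.reverse :: t, by simp [PySem.Chars.splitOn.go, hp, ht]⟩
      · obtain ⟨t, ht⟩ := ih rest (c :: cur) acc
        exact ⟨t, by simp [PySem.Chars.splitOn.go, hp, ht]⟩

-- the first piece returned by splitOn.go (from empty acc) is cur.reverse ++ a prefix of l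
theorem pv_go_head (sep : List Char) (fuel : Nat) (l cur : List Char) :
    ∃ p t, p <+: l ∧ PySem.Chars.splitOn.go sep fuel l cur [] = (cur.reverse ++ p) :: t := by
  induction fuel generalizing l cur with
  | zero => exact ⟨l, [], List.prefix_refl l, by simp [PySem.Chars.splitOn.go]⟩
  | succ fuel ih =>
    cases l with
    | nil => exact ⟨[], [], List.nil_prefix, by simp [PySem.Chars.splitOn.go]⟩
    | cons c rest =>
      by_cases hp : sep.isPrefixOf (c :: rest) = true
      · obtain ⟨t, ht⟩ := pv_go_acc sep fuel (List.drop sep.length (c :: rest)) [] [cur.reverse]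
        exact ⟨[], t, List.nil_prefix, by simpa [PySem.Chars.splitOn.go, hp] using ht⟩
      · obtain ⟨p, t, hpre, hgo⟩ := ih rest (c :: cur)
        exact ⟨c :: p, t, List.cons_prefix_cons.mpr ⟨rfl, hpre⟩,
          by simp [PySem.Chars.splitOn.go, hp, hgo]⟩

theorem pv_splitOn_head (cs sep : List Char) :
    ∃ p t, p <+: cs ∧ PySem.Chars.splitOn cs sep = p :: t := by
  obtain ⟨p, t, hpre, hgo⟩ := pv_go_head sep (cs.length + 1) cs []
  exact ⟨p, t, hpre, by simpa [PySem.Chars.splitOn] using hgo⟩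

theorem pv_dropWhile_head {α : Type} (p : α → Bool) (l : List α) (c : α) (t : List α)
    (h : List.dropWhile p l = c :: t) : p c = false := by
  induction l with
  | nil => simp at h
  | cons a l ih =>
    rw [List.dropWhile_cons] at h
    split_ifs at h with hp
    · exact ih h
    · cases h; simpa using hp

theorem pv_isspace_false_of (d : Char) (h1 : 65 ≤ d.toNat) (h2 : d.toNat ≤ 90) :
    PySem.Chars.isspace d = false := by
  unfold PySem.Chars.isspace
  simp only [Bool.or_eq_false_iff, Bool.and_eq_false_iff, decide_eq_false_iff_not]
  omega

-- strip's head is never whitespace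
theorem pv_strip_head (cs : List Char) (c : Char) (t : List Char)
    (h : PySem.Chars.strip cs = c :: t) : PySem.Chars.isspace c = false := by
  have hpre : PySem.Chars.strip cs <+: PySem.Chars.lstrip cs := by
    have := List.dropWhile_suffix (l := (PySem.Chars.lstrip cs).reverse) PySem.Chars.isspace
    have h2 : (PySem.Chars.strip cs).reverse <:+ (PySem.Chars.lstrip cs).reverse.reverse.reverse := by
      simpa [PySem.Chars.strip, PySem.Chars.rstrip] using this
    rw [List.reverse_reverse] at h2
    exact List.reverse_suffix.mp h2
  obtain ⟨r, hr⟩ := hpre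
  rw [h] at hr
  rw [PySem.Chars.lstrip] at hr
  exact pv_dropWhile_head PySem.Chars.isspace cs c (t ++ r) (by rw [← hr]; simp)

-- upperChar keeps non-whitespace non-whitespace
theorem pv_upperChar_not_space (c : Char) (h : PySem.Chars.isspace c = false) :
    PySem.Chars.isspace (PySem.Chars.upperChar c) = false := by
  unfold PySem.Chars.upperChar
  split_ifs with hl
  · have hc : 'a' ≤ c ∧ c ≤ 'z' := by
      simpa [PySem.Chars.islower] using hl
    have h1 : 97 ≤ c.toNat := hc.1
    have h2 : c.toNat ≤ 122 := hc.2
    have hval : Nat.isValidChar (c.toNat - 32) := Or.inl (by omega)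
    have hv : (Char.ofNat (c.toNat - 32)).toNat = c.toNat - 32 := by
      rw [Char.toNat_ofNat, if_pos hval]
    exact pv_isspace_false_of _ (by omega) (by omega)
  · exact h

-- every word produced by split₀ is free of whitespace
theorem pv_split₀_go_words (cs cur : List Char) (acc : List (List Char))
    (hacc : ∀ w ∈ acc, ∀ c ∈ w, PySem.Chars.isspace c = false)
    (hcur : ∀ c ∈ cur, PySem.Chars.isspace c = false) :
    ∀ w ∈ PySem.Chars.split₀.go cs cur acc, ∀ c ∈ w, PySem.Chars.isspace c = false := by
  induction cs generalizing cur acc with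
  | nil =>
    intro w hw
    unfold PySem.Chars.split₀.go at hw
    split_ifs at hw with hc
    · simp at hw; exact hacc w hw
    · simp at hw
      rcases hw with hw | hw
      · exact hacc w hw
      · subst hw; intro c hc; exact hcur c (by simpa using hc)
  | cons c rest ih =>
    intro w hw
    unfold PySem.Chars.split₀.go at hw
    split_ifs at hw with hsp hemp
    · exact ih [] acc hacc (by simp) w hw
    · refine ih [] (cur.reverse :: acc) ?_ (by simp) w hw
      intro w' hw'
      simp at hw'
      rcases hw' with hw' | hw'
      · subst hw'; intro c' hc'; exact hcur c' (by simpa using hc')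
      · exact hacc w' hw'
    · refine ih (c :: cur) acc hacc ?_ w hw
      intro c' hc'
      simp at hc'
      rcases hc' with hc' | hc'
      · subst hc'; exact Bool.eq_false_iff.mpr hsp
      · exact hcur c' hc'

-- split₀.go never returns [] when it already holds a word
theorem pv_split₀_go_ne_nil (cs cur : List Char) (acc : List (List Char))
    (h : cur ≠ [] ∨ acc ≠ []) : PySem.Chars.split₀.go cs cur acc ≠ [] := by
  induction cs generalizing cur acc with
  | nil =>
    unfold PySem.Chars.split₀.go
    split_ifs with hc
    · rcases h with h | h
      · exact absurd (List.isEmpty_iff.mp hc) h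
      · simpa using h
    · simp
  | cons c rest ih =>
    unfold PySem.Chars.split₀.go
    split_ifs with hsp hemp
    · rcases h with h | h
      · exact absurd (List.isEmpty_iff.mp hemp) h
      · exact ih [] acc (Or.inr h)
    · exact ih [] (cur.reverse :: acc) (Or.inr (by simp))
    · exact ih (c :: cur) acc (Or.inl (by simp))

theorem pv_split₀_ne_nil (c : Char) (t : List Char) (h : PySem.Chars.isspace c = false) :
    PySem.Chars.split₀ (c :: t) ≠ [] := by
  unfold PySem.Chars.split₀
  unfold PySem.Chars.split₀.go
  simp [h]
  exact pv_split₀_go_ne_nil t [c] [] (Or.inl (by simp))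

theorem pv_split₀_words (cs : List Char) :
    ∀ w ∈ PySem.Chars.split₀ cs, ∀ c ∈ w, PySem.Chars.isspace c = false :=
  pv_split₀_go_words cs [] [] (by simp) (by simp)

-- str(int(n)) never contains a space
set_option maxHeartbeats 1000000 in
theorem pv_digitChar_ne_space (m : Nat) : Nat.digitChar m ≠ ' ' := by
  rcases m with _|_|_|_|_|_|_|_|_|_|_|_|_|_|_|_|m
  case succ =>
    rw [Nat.digitChar.eq_def]
    repeat rw [if_neg (by omega)]
    decide
  all_goals decide

theorem pv_toDigitsCore_no_space (fuel m : Nat) (acc : List Char) (h : ' ' ∉ acc) :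
    ' ' ∉ Nat.toDigitsCore 10 fuel m acc := by
  induction fuel generalizing m acc with
  | zero => simpa [Nat.toDigitsCore] using h
  | succ fuel ih =>
    rw [show Nat.toDigitsCore 10 (fuel + 1) m acc
        = (if m / 10 = 0 then (m % 10).digitChar :: acc
           else Nat.toDigitsCore 10 fuel (m / 10) ((m % 10).digitChar :: acc)) from rfl]
    split_ifs with h0
    · intro hmem
      rcases List.mem_cons.mp hmem with hmem | hmem
      · exact pv_digitChar_ne_space (m % 10) hmem.symm
      · exact h hmem
    · refine ih (m / 10) ((m % 10).digitChar :: acc) ?_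
      intro hmem
      rcases List.mem_cons.mp hmem with hmem | hmem
      · exact pv_digitChar_ne_space (m % 10) hmem.symm
      · exact h hmem

theorem pv_toChars_no_space (n : Int) : ' ' ∉ PySem.Int.toChars n := by
  unfold PySem.Int.toChars
  split_ifs with h
  · intro hmem
    rcases List.mem_cons.mp hmem with hmem | hmem
    · exact absurd hmem.symm (by decide)
    · exact pv_toDigitsCore_no_space _ _ [] (by simp) hmem
  · exact pv_toDigitsCore_no_space _ _ [] (by simp)

-- the key suffix lemma: for space-free w and K, (x ++ ' '::w) ends with ' '::K  iff  w = K
theorem pv_endswith_join (x w K : List Char) (hw : ' ' ∉ w) (hK : ' ' ∉ K) :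
    ((' ' :: K) <:+ (x ++ ' ' :: w)) ↔ w = K := by
  constructor
  · intro h
    have hw' : (' ' :: w) <:+ (x ++ ' ' :: w) := ⟨x, rfl⟩
    rcases List.suffix_or_suffix_of_suffix h hw' with h1 | h1
    · rcases List.suffix_cons_iff.mp h1 with h2 | h2
      · exact (List.cons.injEq _ _ _ _ ▸ h2).2.symm ▸ rfl
      · exact absurd (h2.subset (List.mem_cons_self)) hw
    · rcases List.suffix_cons_iff.mp h1 with h2 | h2
      · exact ((List.cons.injEq _ _ _ _ ▸ h2).2)
      · exact absurd (h2.subset (List.mem_cons_self)) hK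
  · rintro rfl
    exact ⟨x, rfl⟩

theorem pv_endswith_single (w K : List Char) (hw : ' ' ∉ w) : ¬ ((' ' :: K) <:+ w) :=
  fun h => hw (h.subset List.mem_cons_self)

-- join with a space separator, last word split off
theorem pv_join_concat (ps : List (List Char)) (w : List Char) (h : ps ≠ []) :
    PySem.Chars.join [' '] (ps ++ [w]) = PySem.Chars.join [' '] ps ++ ' ' :: w := by
  induction ps with
  | nil => exact absurd rfl h
  | cons p ps ih =>
    cases ps with
    | nil => simp [PySem.Chars.join, List.intercalate]
    | cons q qs =>
      have := ih (by simp)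
      simp only [PySem.Chars.join, List.intercalate] at this ⊢
      simp only [List.cons_append, List.intersperse, List.flatten_cons] at this ⊢
      simp [this]

-- a[:-len(y)] recovers x from x ++ y
theorem pv_slice_drop (x y : List Char) (hy : y ≠ []) :
    PySem.List.slice (x ++ y) none (some (-(y.length : Int))) = x := by
  have hylen : 0 < y.length := List.length_pos_iff.mpr hy
  unfold PySem.List.slice PySem.List.clampIdx
  have h1 : ¬ ((x.length : Int) + y.length + -(y.length : Int) < 0) := by push_cast; omega
  have h2 : (-(y.length : Int) < 0) := by omega
  simp only [List.length_append, h2, if_true]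
  push_cast
  rw [if_neg (by omega)]
  have h3 : ((x.length : Int) + y.length + -(y.length : Int)).toNat = x.length := by omega
  rw [h3]
  simp [List.take_left]

-- first-match lookup in an association list = Dict.getD
theorem pv_getD_cons (k v w dflt : String) (rest : List (String × String)) :
    PySem.Dict.getD ⟨(k, v) :: rest⟩ w dflt
      = if k = w then v else PySem.Dict.getD ⟨rest⟩ w dflt := by
  by_cases h : k = w
  · simp [PySem.Dict.getD, PySem.Dict.get?, List.find?_cons_of_pos, h]
  · rw [if_neg h]
    unfold PySem.Dict.getD PySem.Dict.get?
    rw [show (PySem.Dict.mk ((k, v) :: rest)).items = (k, v) :: rest from rfl,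
        List.find?_cons_of_neg (by simp [h])]

-- A's endswith scan over space-prefixed pairs = B's lookup on the last word
theorem pv_scan_vs_lookup (ps : List String) (w : String)
    (hps : ∀ u ∈ ps, ' ' ∉ u.toList) (hw : ' ' ∉ w.toList)
    (L : List (String × String)) (hL : ∀ p ∈ L, ' ' ∉ p.1.toList) :
    pvSuffixScan (PySem.Str.join " " (ps ++ [w])) (L.map (fun p => (" " ++ p.1, " " ++ p.2)))
      = PySem.Str.join " " (ps ++ [if ps = [] then w else PySem.Dict.getD ⟨L⟩ w w]) := by
  induction L with
  | nil =>
    have hd : PySem.Dict.getD (⟨[]⟩ : PySem.Dict String String) w w = w := rfl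
    simp only [List.map_nil, pvSuffixScan, hd, ite_self]
  | cons kv L ih =>
    obtain ⟨k, v⟩ := kv
    have hk : ' ' ∉ k.toList := hL (k, v) List.mem_cons_self
    have hL' : ∀ p ∈ L, ' ' ∉ p.1.toList := fun p hp => hL p (List.mem_cons_of_mem _ hp)
    have hsp : (" " : String).toList = [' '] := rfl
    have hjoin : (PySem.Str.join " " (ps ++ [w])).toList
        = PySem.Chars.join [' '] ((ps.map String.toList) ++ [w.toList]) := by
      rw [PySem.Str.toList_join]
      simp [hsp]
    have hsepk : (" " ++ k).toList = ' ' :: k.toList := by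
      rw [String.toList_append]; rfl
    by_cases hps0 : ps = []
    · subst hps0
      -- joined string is just w; a space-prefixed suffix never matches
      have hnosuf : PySem.Str.endswith (PySem.Str.join " " ([] ++ [w])) (" " ++ k) = false := by
        rw [PySem.Str.endswith_eq, Bool.eq_false_iff]
        intro hc
        have hc' := (PySem.Chars.endswith_iff _ _).mp hc
        rw [hjoin, hsepk] at hc'
        simp only [List.map_nil, List.nil_append] at hc'
        have hjw : PySem.Chars.join [' '] [w.toList] = w.toList := by
          simp [PySem.Chars.join, List.intercalate]
        rw [hjw] at hc'
        exact pv_endswith_single w.toList k.toList hw hc'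
      simp only [List.map_cons, pvSuffixScan, hnosuf]
      simpa using ih hL'
    · -- ps ≠ []: the suffix matches iff the last word equals k
      have hpsm : (ps.map String.toList) ≠ [] := by simpa using hps0
      have hjoin2 : (PySem.Str.join " " (ps ++ [w])).toList
          = PySem.Chars.join [' '] (ps.map String.toList) ++ ' ' :: w.toList := by
        rw [hjoin, pv_join_concat _ _ hpsm]
      have hmatch : PySem.Str.endswith (PySem.Str.join " " (ps ++ [w])) (" " ++ k)
          = decide (w = k) := by
        rw [PySem.Str.endswith_eq]
        by_cases hwk : w = k
        · subst hwk
          rw [show PySem.Chars.endswith (PySem.Str.join " " (ps ++ [w])).toList (" " ++ w).toList = true from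
              (PySem.Chars.endswith_iff _ _).mpr (by rw [hjoin2, hsepk]; exact ⟨_, rfl⟩)]
          simp
        · rw [decide_eq_false hwk, Bool.eq_false_iff]
          intro hc
          have hsuf := (PySem.Chars.endswith_iff _ _).mp hc
          rw [hjoin2, hsepk] at hsuf
          have hlst : w.toList = k.toList := (pv_endswith_join _ _ _ hw hk).mp hsuf
          exact hwk (String.toList_inj.mp hlst)
      by_cases hwk : w = k
      · -- matching branch: slice off ' '::k and append ' '::v
        subst hwk
        simp only [List.map_cons, pvSuffixScan, hmatch, decide_true, if_true]
        rw [pv_getD_cons, if_neg hps0, if_pos rfl]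
        apply String.toList_inj.mp
        rw [String.toList_append, PySem.Str.slice, String.toList_ofList]
        rw [PySem.Chars.slice_eq_listSlice, hjoin2]
        have hlen : PySem.Str.len (" " ++ w) = ((' ' :: w.toList).length : Int) := by
          simp [PySem.Str.len, hsepk]
        rw [hlen, pv_slice_drop _ _ (by simp)]
        have hsepv : (" " ++ v).toList = ' ' :: v.toList := by
          rw [String.toList_append]; rfl
        rw [hsepv]
        have hjv : (PySem.Str.join " " (ps ++ [v])).toList
            = PySem.Chars.join [' '] (ps.map String.toList) ++ ' ' :: v.toList := by
          rw [PySem.Str.toList_join]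
          simp only [List.map_append, List.map_cons, List.map_nil, hsp]
          rw [pv_join_concat _ _ hpsm]
        rw [hjv]
      · have hbf : decide (w = k) = false := decide_eq_false hwk
        simp only [List.map_cons, pvSuffixScan, hmatch, hbf, Bool.false_eq_true, if_false]
        rw [ih hL', pv_getD_cons]
        simp only [if_neg hps0]
        rw [if_neg (show ¬ k = w from fun hh => hwk hh.symm)]

-- the two suffix tables line up
theorem pv_tables : pvSuffixMap = pvSuffixAbbrev.items.map (fun p => (" " ++ p.1, " " ++ p.2)) := by
  decide

-- ===== VERDICT (by name: the statement is the Claim_ definition above) =====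
-- keys of the abbreviation table are space-free
theorem pv_keys_no_space : ∀ p ∈ pvSuffixAbbrev.items, ' ' ∉ p.1.toList := by
  decide

-- Dict eta
theorem pv_dict_eta : (⟨pvSuffixAbbrev.items⟩ : PySem.Dict String String) = pvSuffixAbbrev := rfl

theorem normalize_address_for_search_spec : Claim_equal_normalize_address_for_search := by
  intro address _
  unfold Spec_normalize_address_for_search
  by_cases h0 : address = ""
  · subst h0; decide
  unfold normalize_address_for_search normalize_address_for_search_alt
  rw [if_neg h0]
  simp only []    -- zeta-reduce port A's let chain
  set a1 := ((PySem.Str.split? (PySem.Str.strip address) ",").getD []).headD "" with ha1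
  by_cases h1 : a1 = ""
  · rw [if_pos h1, h1]
    first
    | rfl
    | skip
  rw [if_neg h1]
  -- a1 is a nonempty prefix of the stripped address, so it starts with a non-space char
  obtain ⟨p, tl, hpre, hsplit⟩ := pv_splitOn_head (PySem.Str.strip address).toList [',']
  have hsplit? : PySem.Str.split? (PySem.Str.strip address) "," =
      some ((PySem.Chars.splitOn (PySem.Str.strip address).toList [',']).map String.ofList) := by
    simp [PySem.Str.split?, PySem.Chars.split?]
    first
    | rfl
    | skip
  have ha1v : a1 = String.ofList p := by
    rw [ha1, hsplit?, hsplit]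
    simp
  have hpne : p ≠ [] := by
    intro hp
    apply h1
    rw [ha1v, hp]
    first
    | rfl
    | skip
  obtain ⟨c, p', rfl⟩ := List.exists_cons_of_ne_nil hpne
  have hcns : PySem.Chars.isspace c = false := by
    obtain ⟨r, hr⟩ := hpre
    have hstr : PySem.Chars.strip address.toList = c :: (p' ++ r) := by
      rw [← PySem.Str.toList_strip, ← hr]
      simp
    exact pv_strip_head address.toList c _ hstr
  -- hence the word list is nonempty
  have ha1l : a1.toList = c :: p' := by rw [ha1v]; simp [String.toList_ofList]
  have hupl : (PySem.Str.upper a1).toList = PySem.Chars.upperChar c :: (PySem.Chars.upper p') := by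
    rw [PySem.Str.toList_upper, ha1l]
    simp [PySem.Chars.upper]
  have hwne : PySem.Chars.split₀ (PySem.Str.upper a1).toList ≠ [] := by
    rw [hupl]
    exact pv_split₀_ne_nil _ _ (pv_upperChar_not_space c hcns)
  have hwne' : PySem.Str.split₀ (PySem.Str.upper a1) ≠ [] := by
    intro h
    apply hwne
    rw [← PySem.Str.split₀_map_toList, h]
    rfl
  -- every word is space-free
  have hwords : ∀ u ∈ PySem.Str.split₀ (PySem.Str.upper a1), ' ' ∉ u.toList := by
    intro u hu
    unfold PySem.Str.split₀ at hu
    obtain ⟨w, hw, rfl⟩ := List.mem_map.mp hu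
    rw [String.toList_ofList]
    intro hsp
    have := pv_split₀_words _ w hw ' ' hsp
    simp [PySem.Chars.isspace] at this
  obtain ⟨w0, rest, hwr⟩ := List.exists_cons_of_ne_nil hwne'
  rw [hwr] at hwords
  rw [hwr]
  simp only []    -- reduce both matches on w0 :: rest (and port B's lets)
  rw [← apply_ite (fun x : String => x :: rest)]
  set w0' : String := (if PySem.Str.strIsdigit w0 = true then
      match PySem.Int.ofStr? w0 with
      | some n => PySem.Int.toStr n
      | none => w0
    else w0) with hw0'
  have hw0sp : ' ' ∉ w0'.toList := by
    rw [hw0']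
    split_ifs with hd
    · cases hofs : PySem.Int.ofStr? w0 with
      | none => exact hwords w0 List.mem_cons_self
      | some n =>
        rw [PySem.Int.toList_toStr]
        exact pv_toChars_no_space n
    · exact hwords w0 List.mem_cons_self
  have hrest : ∀ u ∈ rest, ' ' ∉ u.toList := fun u hu => hwords u (List.mem_cons_of_mem _ hu)
  -- reduce to the scan-vs-lookup lemma
  have hcore : pvSuffixScan (PySem.Str.join " " (w0' :: rest)) pvSuffixMap
      = PySem.Str.join " " (if 2 ≤ (w0' :: rest).length
          then (w0' :: rest).dropLast
            ++ [pvSuffixAbbrev.getD (PySem.List.pyGetD (w0' :: rest) (-1) "")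
                  (PySem.List.pyGetD (w0' :: rest) (-1) "")]
          else (w0' :: rest)) := by
    rcases List.eq_nil_or_concat rest with rfl | ⟨ps', w, rfl⟩
    · -- single word
      have hlk := pv_scan_vs_lookup [] w0' (by simp) hw0sp pvSuffixAbbrev.items pv_keys_no_space
      rw [pv_tables]
      simp only [List.nil_append] at hlk
      rw [hlk]
      have hlast : PySem.List.pyGetD ([] ++ [w0']) (-1) "" = w0' :=
        PySem.List.pyGetD_neg_one_append_singleton [] w0' ""
      simp only [List.nil_append] at hlast
      simp [hlast]
    · -- at least two words
      simp only [List.concat_eq_append, ← List.cons_append]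
      have hps : ∀ u ∈ (w0' :: ps'), ' ' ∉ u.toList := by
        intro u hu
        rcases List.mem_cons.mp hu with rfl | hu
        · exact hw0sp
        · exact hrest u (by rw [List.concat_eq_append]; exact List.mem_append_left _ hu)
      have hwsp : ' ' ∉ w.toList :=
        hrest w (by rw [List.concat_eq_append]; exact List.mem_append_right _ List.mem_cons_self)
      have hlk := pv_scan_vs_lookup (w0' :: ps') w hps hwsp pvSuffixAbbrev.items pv_keys_no_space
      rw [pv_tables, hlk]
      rw [if_neg (by simp)]
      have hlast : PySem.List.pyGetD ((w0' :: ps') ++ [w]) (-1) "" = w :=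
        PySem.List.pyGetD_neg_one_append_singleton _ w ""
      rw [hlast]
      rw [if_pos (by simp)]
      rw [List.dropLast_concat, pv_dict_eta]
  rw [hcore]
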